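-- pv_equiv track=rewrite | github.com/kosuri-indu/HoneyBeeBreeding | bee_breeding.py | generate_hexagon_coordinates
-- ===== SOURCE A (Python) =====
-- def generate_leftover_coordinates(x_diff,sign,num,ring):
--     if ring==1 and sign==1:
--         return [[-74,0]]
--     elif ring==1 and sign!=1:
--         return [[74,0]]
--
--     x = (num * 37) * (ring+1) * (x_diff)
--     y_start = 22 * (ring - 1)
--     coordinates = []
--     for i in range(ring):
--         y = y_start - i * 44
--         coordinates.append([x, y])
--
--     for i in range(len(coordinates)):
--         for j in range(2):
--             coordinates[i][j] *= sign
--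
--     return coordinates
--
-- def generate_hexagon_coordinates(ring):
--     coordinates = [[0, ring * 44]]
--
--     for i in range(1, ring + 1):
--         x = -i * 37
--         y = ring * 44 - i * 22
--         coordinates.append([x, y])
--
--     if ring>1:
--         l = generate_leftover_coordinates(1,1,-1,ring-1)
--         coordinates.extend(l)
--
--     for i in range(ring, 0, -1):
--         x = -i * 37
--         y = -ring * 44 + i * 22
--         coordinates.append([x, y])
--
--     coordinates.append([0, -ring * 44])
--
--     for i in range(1, ring + 1):
--         x = i * 37
--         y = -ring * 44 + i * 22
--         coordinates.append([x, y])
--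
--     if ring>1:
--         l = generate_leftover_coordinates(-1,-1,1,ring-1)
--         coordinates.extend(l)
--
--     for i in range(ring, 0, -1):
--         x = i * 37
--         y = ring * 44 - i * 22
--         coordinates.append([x, y])
--
--     for i in range(ring - 1):
--         x = coordinates.pop()
--         coordinates.insert(0, x)
--
--     return coordinates
-- ===== SOURCE B (Python) =====
-- # One unified pass over the 6*ring perimeter points: each point's x,y is computed
-- # directly from its index (vertex + offset*step), with A's final (ring-1)-step
-- # rotation folded into the index formula.  For ring == 0 this naturally yields [].
-- _VERTS = [(0, 44), (-37, 22), (-37, -22), (0, -44), (37, -22), (37, 22)]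
-- _STEPS = [(-37, -22), (0, -44), (37, -22), (37, 22), (0, 44), (-37, 22)]
--
-- def generate_hexagon_coordinates(ring):
--     n = 6 * ring
--     out = []
--     for k in range(n):
--         t = (k + 5 * ring + 1) % n      # undo the rotation by ring-1
--         e, o = divmod(t, ring)
--         vx, vy = _VERTS[e]
--         sx, sy = _STEPS[e]
--         out.append([vx * ring + o * sx, vy * ring + o * sy])
--     return out
-- ===== Notes on version B (the rewrite author's own statement) =====
-- stated objective: faster
-- what changed: A builds the hexagon from seven separate segment loops plus a leftover helper and then rotates the list with repeated pop/insert-at-front steps; B emits the final coordinates in a single loop over the perimeter indices, computing each point as vertex + offset*step with the rotation folded into the index formula.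
-- intended difference: At ring = 0 there is no ring of cells: A returns the origin point duplicated, [[0, 0], [0, 0]], an artefact of its two unconditional appends, while B returns the intended empty perimeter []. — e.g. on generate_hexagon_coordinates(0): A returns [[0, 0], [0, 0]], B returns []
-- outside the precondition, e.g. on generate_hexagon_coordinates(-1): A returns [[0, -44], [0, 44]], B returns []
import Mathlib
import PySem

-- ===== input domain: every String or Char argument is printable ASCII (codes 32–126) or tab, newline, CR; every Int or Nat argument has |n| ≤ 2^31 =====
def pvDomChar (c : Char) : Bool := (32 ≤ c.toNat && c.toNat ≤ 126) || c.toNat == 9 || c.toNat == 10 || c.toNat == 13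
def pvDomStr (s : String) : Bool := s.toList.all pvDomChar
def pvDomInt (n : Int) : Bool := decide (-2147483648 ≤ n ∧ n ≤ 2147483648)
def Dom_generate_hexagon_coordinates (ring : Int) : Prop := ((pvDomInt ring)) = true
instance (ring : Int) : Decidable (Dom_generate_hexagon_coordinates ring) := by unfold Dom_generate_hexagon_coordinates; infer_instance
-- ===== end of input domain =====

-- B replaces A's seven segment loops + leftover helper + quadratic pop/insert rotation by one
-- unified pass over the perimeter indices, computing each point directly from its index.


-- ===== PORT A =====
def generate_leftover_coordinates (x_diff sign num ring : Int) : List (List Int) :=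
  if ring = 1 ∧ sign = 1 then [[-74, 0]]
  else if ring = 1 ∧ sign ≠ 1 then [[74, 0]]
  else
    let x := num * 37 * (ring + 1) * x_diff
    let y_start := 22 * (ring - 1)
    let coordinates :=
      (PySem.List.pyRange 0 ring 1).foldl (fun acc i => acc ++ [[x, y_start - i * 44]]) []
    -- 'for i in range(len(coordinates)): for j in range(2): coordinates[i][j] *= sign':
    -- every inner list has exactly the 2 entries built above, so the loop multiplies both.
    coordinates.map (fun c => c.map (fun v => v * sign))

def generate_hexagon_coordinates (ring : Int) : List (List Int) :=
  let c0 := [[0, ring * 44]]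
  let c1 := (PySem.List.pyRange 1 (ring + 1) 1).foldl
    (fun acc i => acc ++ [[-i * 37, ring * 44 - i * 22]]) c0
  let c2 := if ring > 1 then c1 ++ generate_leftover_coordinates 1 1 (-1) (ring - 1) else c1
  let c3 := (PySem.List.pyRange ring 0 (-1)).foldl
    (fun acc i => acc ++ [[-i * 37, -ring * 44 + i * 22]]) c2
  let c4 := c3 ++ [[0, -ring * 44]]
  let c5 := (PySem.List.pyRange 1 (ring + 1) 1).foldl
    (fun acc i => acc ++ [[i * 37, -ring * 44 + i * 22]]) c4
  let c6 := if ring > 1 then c5 ++ generate_leftover_coordinates (-1) (-1) 1 (ring - 1) else c5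
  let c7 := (PySem.List.pyRange ring 0 (-1)).foldl
    (fun acc i => acc ++ [[i * 37, ring * 44 - i * 22]]) c6
  (PySem.List.pyRange 0 (ring - 1) 1).foldl
    (fun l _ =>
      match PySem.List.pop? l (-1) with
      | some (x, rest) => PySem.List.insert rest 0 x
      | none => l)      -- pop() on the empty list would raise in Python; unreachable totality guard
    c7

-- ===== PORT B =====
def generate_hexagon_coordinates_alt (ring : Int) : List (List Int) :=
  let verts : List (Int × Int) := [(0, 44), (-37, 22), (-37, -22), (0, -44), (37, -22), (37, 22)]
  let steps : List (Int × Int) := [(-37, -22), (0, -44), (37, -22), (37, 22), (0, 44), (-37, 22)]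
  let n := 6 * ring
  (PySem.List.pyRange 0 n 1).map (fun k =>
    let t := PySem.Int.mod (k + 5 * ring + 1) n
    let e := PySem.Int.floordiv t ring
    let o := PySem.Int.mod t ring
    match PySem.List.pyGet? verts e, PySem.List.pyGet? steps e with
    | some (vx, vy), some (sx, sy) => [vx * ring + o * sx, vy * ring + o * sy]
    | _, _ => [])      -- e is always in range; unreachable totality guard

-- ===== PRECONDITION & SPEC =====
-- Pre_ restricts to the natural domain of a ring index: negative ring counts are outside it
-- (there A's descending/empty loops produce a two-point artefact, B an empty list).
def Pre_generate_hexagon_coordinates (ring : Int) : Prop := 0 ≤ ring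
instance (ring : Int) : Decidable (Pre_generate_hexagon_coordinates ring) := by
  unfold Pre_generate_hexagon_coordinates; infer_instance
def pvWitness_generate_hexagon_coordinates : Int := 2

-- At ring = 0 there is no ring of cells: A returns the origin duplicated, [[0, 0], [0, 0]],
-- an artefact of its two unconditional appends; B returns the intended empty perimeter [].
def D_generate_hexagon_coordinates (ring : Int) : Prop := ring = 0
instance (ring : Int) : Decidable (D_generate_hexagon_coordinates ring) := by
  unfold D_generate_hexagon_coordinates; infer_instance

def Spec_generate_hexagon_coordinates (ring : Int) (out : List (List Int)) : Prop :=
  ¬ D_generate_hexagon_coordinates ring → out = generate_hexagon_coordinates_alt ring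
instance (ring : Int) (out : List (List Int)) : Decidable (Spec_generate_hexagon_coordinates ring out) := by
  unfold Spec_generate_hexagon_coordinates; infer_instance

def pvDiffWitness_generate_hexagon_coordinates : Int := 0
def pvDiffWitnessOut_generate_hexagon_coordinates : (List (List Int)) × (List (List Int)) :=
  ([[0, 0], [0, 0]], [])

-- ===== CLAIM (what is proved, stated in full; the proofs are below) =====
def Claim_unchanged_generate_hexagon_coordinates : Prop := ∀ (ring : Int), Dom_generate_hexagon_coordinates ring → Pre_generate_hexagon_coordinates ring → Spec_generate_hexagon_coordinates ring (generate_hexagon_coordinates ring)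
def Claim_changed_generate_hexagon_coordinates : Prop := Dom_generate_hexagon_coordinates (pvDiffWitness_generate_hexagon_coordinates) ∧ Pre_generate_hexagon_coordinates (pvDiffWitness_generate_hexagon_coordinates) ∧ D_generate_hexagon_coordinates (pvDiffWitness_generate_hexagon_coordinates) ∧ generate_hexagon_coordinates (pvDiffWitness_generate_hexagon_coordinates) = pvDiffWitnessOut_generate_hexagon_coordinates.1 ∧ generate_hexagon_coordinates_alt (pvDiffWitness_generate_hexagon_coordinates) = pvDiffWitnessOut_generate_hexagon_coordinates.2 ∧ pvDiffWitnessOut_generate_hexagon_coordinates.1 ≠ pvDiffWitnessOut_generate_hexagon_coordinates.2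
def Claim_exact_generate_hexagon_coordinates : Prop := ∀ (ring : Int), Dom_generate_hexagon_coordinates ring → Pre_generate_hexagon_coordinates ring → D_generate_hexagon_coordinates ring → generate_hexagon_coordinates ring ≠ generate_hexagon_coordinates_alt ring

-- ===== LEMMAS AND PROOFS =====

-- vertex and step tables of the perimeter, indexed by edge number
def ptv (e : Nat) : Int × Int :=
  if e = 0 then (0, 44) else if e = 1 then (-37, 22) else if e = 2 then (-37, -22)
  else if e = 3 then (0, -44) else if e = 4 then (37, -22) else (37, 22)
def ptstep (e : Nat) : Int × Int :=
  if e = 0 then (-37, -22) else if e = 1 then (0, -44) else if e = 2 then (37, -22)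
  else if e = 3 then (37, 22) else if e = 4 then (0, 44) else (-37, 22)

-- the u-th point of the (un-rotated) perimeter of ring r
def pt (r u : Nat) : List Int :=
  [(ptv (u / r)).1 * r + (u % r : Nat) * (ptstep (u / r)).1,
   (ptv (u / r)).2 * r + (u % r : Nat) * (ptstep (u / r)).2]

lemma foldl_const_iterate {α β : Type} (f : α → α) (L : List β) (c : α) :
    L.foldl (fun acc _ => f acc) c = f^[L.length] c := by
  induction L generalizing c with
  | nil => rfl
  | cons x xs ih => simp [List.foldl_cons, ih, Function.iterate_succ_apply]

def rot1 {α : Type} (l : List α) : List α :=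
  match PySem.List.pop? l (-1) with
  | some (x, rest) => PySem.List.insert rest 0 x
  | none => l

lemma rot1_append {α : Type} (xs : List α) (x : α) : rot1 (xs ++ [x]) = x :: xs := by
  simp [rot1, PySem.List.pop?_last, PySem.List.insert_zero]

lemma rot1_iterate {α : Type} (l : List α) (m : Nat) (hm : m ≤ l.length) :
    rot1^[m] l = l.drop (l.length - m) ++ l.take (l.length - m) := by
  induction m with
  | zero => simp
  | succ m ih =>
    rw [Function.iterate_succ_apply', ih (by omega)]
    have ha : l.length - m = (l.length - (m + 1)) + 1 := by omega
    have hlt : l.length - (m + 1) < l.length := by omega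
    rw [ha, List.take_add_one, List.getElem?_eq_getElem hlt]
    simp only [Option.toList_some]
    rw [show l.drop (l.length - (m+1) + 1) ++ (l.take (l.length - (m+1)) ++ [l[l.length - (m+1)]]) =
        (l.drop (l.length - (m+1) + 1) ++ l.take (l.length - (m+1))) ++ [l[l.length - (m+1)]] by
      simp [List.append_assoc]]
    rw [rot1_append, List.drop_eq_getElem_cons hlt]
    rfl

lemma divmod_eq (r e o : Nat) (hr : 1 ≤ r) (ho : o < r) :
    (e * r + o) / r = e ∧ (e * r + o) % r = o := by
  constructor
  · rw [mul_comm, Nat.mul_add_div (by omega)]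
    simp [Nat.div_eq_of_lt ho]
  · rw [mul_comm, Nat.mul_add_mod, Nat.mod_eq_of_lt ho]

lemma pt_eq (r e o : Nat) (hr : 1 ≤ r) (ho : o < r) :
    pt r (e * r + o) =
      [(ptv e).1 * r + (o : Int) * (ptstep e).1, (ptv e).2 * r + (o : Int) * (ptstep e).2] := by
  obtain ⟨h1, h2⟩ := divmod_eq r e o hr ho
  simp [pt, h1, h2]

-- A's leftover helper, in closed form (its ring==1 special cases agree with the general formula)
lemma leftover_pos (r : Nat) (hr : 2 ≤ r) :
    generate_leftover_coordinates 1 1 (-1) ((r : Int) - 1) =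
      (List.range (r - 1)).map (fun (j : Nat) => [-(r : Int) * 37, 22 * ((r : Int) - 2) - (j : Int) * 44]) := by
  rcases Nat.eq_or_lt_of_le hr with h2 | h3
  · rw [← h2]; decide
  · unfold generate_leftover_coordinates
    rw [if_neg (by omega), if_neg (by simp)]
    simp only [PySem.List.foldl_append_singleton_eq_map, PySem.List.pyRange_one, List.map_map,
      List.nil_append, List.map_map]
    rw [show ((r:Int) - 1 - 0).toNat = r - 1 by omega]
    refine List.map_congr_left (fun j hj => ?_)
    simp only [Function.comp_apply, List.map_cons, List.map_nil, mul_one, List.cons.injEq,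
      and_true]
    first
      | (constructor <;> push_cast <;> ring)
      | (constructor <;> ring)

lemma leftover_neg (r : Nat) (hr : 2 ≤ r) :
    generate_leftover_coordinates (-1) (-1) 1 ((r : Int) - 1) =
      (List.range (r - 1)).map (fun (j : Nat) => [(r : Int) * 37, (j : Int) * 44 - 22 * ((r : Int) - 2)]) := by
  rcases Nat.eq_or_lt_of_le hr with h2 | h3
  · rw [← h2]; decide
  · unfold generate_leftover_coordinates
    rw [if_neg (by omega), if_neg (by omega)]
    simp only [PySem.List.foldl_append_singleton_eq_map, PySem.List.pyRange_one, List.map_map,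
      List.nil_append]
    rw [show ((r:Int) - 1 - 0).toNat = r - 1 by omega]
    refine List.map_congr_left (fun j hj => ?_)
    simp only [Function.comp_apply, List.map_cons, List.map_nil, List.cons.injEq, and_true]
    first
      | (constructor <;> push_cast <;> ring)
      | (constructor <;> ring)

-- the perimeter list
def preL (r : Nat) : List (List Int) := (List.range (6 * r)).map (pt r)

lemma length_preL (r : Nat) : (preL r).length = 6 * r := by simp [preL]

-- the seven segments of A, re-indexed as perimeter points
lemma chunk1 (r : Nat) (hr : 1 ≤ r) :
    (PySem.List.pyRange 1 ((r:Int) + 1) 1).map (fun i => [-i * 37, (r:Int) * 44 - i * 22])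
      = (List.range r).map (fun j => pt r (1 + j)) := by
  rw [PySem.List.pyRange_one, List.map_map, show ((r:Int) + 1 - 1).toNat = r by omega]
  refine List.map_congr_left (fun j hj => ?_)
  simp only [List.mem_range] at hj
  rcases Nat.lt_or_ge (1 + j) r with h | h
  · rw [show 1 + j = 0 * r + (1 + j) by ring, pt_eq r 0 (1 + j) hr h]
    simp only [ptv, ptstep, Function.comp_apply, List.cons.injEq, and_true]
    first
      | (constructor <;> push_cast <;> ring)
      | (constructor <;> ring)
  · have hjr : 1 + j = r := by omega
    rw [show 1 + j = 1 * r + 0 by omega, pt_eq r 1 0 hr hr]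
    simp only [ptv, ptstep, Function.comp_apply, List.cons.injEq, and_true]
    norm_num
    have hc : (1 : Int) + (j : Int) = (r : Int) := by omega
    constructor <;> push_cast <;> omega

lemma chunk2 (r : Nat) (hr : 1 ≤ r) :
    (List.range (r - 1)).map (fun (j : Nat) => [-(r : Int) * 37, 22 * ((r : Int) - 2) - (j : Int) * 44])
      = (List.range (r - 1)).map (fun j => pt r (1 + r + j)) := by
  refine List.map_congr_left (fun j hj => ?_)
  simp only [List.mem_range] at hj
  rw [show 1 + r + j = 1 * r + (1 + j) by ring, pt_eq r 1 (1 + j) hr (by omega)]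
  simp only [ptv, ptstep, List.cons.injEq, and_true]
  norm_num
  first
      | (constructor <;> push_cast <;> ring)
      | (constructor <;> ring)

lemma chunk3 (r : Nat) (hr : 1 ≤ r) :
    (PySem.List.pyRange (r:Int) 0 (-1)).map (fun i => [-i * 37, -(r:Int) * 44 + i * 22])
      = (List.range r).map (fun j => pt r (2 * r + j)) := by
  rw [PySem.List.pyRange_neg_one, List.map_map, show ((r:Int) - 0).toNat = r by omega]
  refine List.map_congr_left (fun j hj => ?_)
  simp only [List.mem_range] at hj
  rw [show 2 * r + j = 2 * r + j from rfl, pt_eq r 2 j hr hj]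
  simp only [ptv, ptstep, Function.comp_apply, List.cons.injEq, and_true]
  norm_num
  first
      | (constructor <;> push_cast <;> ring)
      | (constructor <;> ring)

lemma chunk5 (r : Nat) (hr : 1 ≤ r) :
    (PySem.List.pyRange 1 ((r:Int) + 1) 1).map (fun i => [i * 37, -(r:Int) * 44 + i * 22])
      = (List.range r).map (fun j => pt r (3 * r + 1 + j)) := by
  rw [PySem.List.pyRange_one, List.map_map, show ((r:Int) + 1 - 1).toNat = r by omega]
  refine List.map_congr_left (fun j hj => ?_)
  simp only [List.mem_range] at hj
  rcases Nat.lt_or_ge (1 + j) r with h | h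
  · rw [show 3 * r + 1 + j = 3 * r + (1 + j) by ring, pt_eq r 3 (1 + j) hr h]
    simp only [ptv, ptstep, Function.comp_apply, List.cons.injEq, and_true]
    norm_num
    ring
  · have hjr : 1 + j = r := by omega
    rw [show 3 * r + 1 + j = 4 * r + 0 by omega, pt_eq r 4 0 hr hr]
    simp only [ptv, ptstep, Function.comp_apply, List.cons.injEq, and_true]
    norm_num
    have hc : (1 : Int) + (j : Int) = (r : Int) := by omega
    constructor <;> push_cast <;> omega

lemma chunk6 (r : Nat) (hr : 1 ≤ r) :
    (List.range (r - 1)).map (fun (j : Nat) => [(r : Int) * 37, (j : Int) * 44 - 22 * ((r : Int) - 2)])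
      = (List.range (r - 1)).map (fun j => pt r (4 * r + 1 + j)) := by
  refine List.map_congr_left (fun j hj => ?_)
  simp only [List.mem_range] at hj
  rw [show 4 * r + 1 + j = 4 * r + (1 + j) by ring, pt_eq r 4 (1 + j) hr (by omega)]
  simp only [ptv, ptstep, List.cons.injEq, and_true]
  norm_num
  first
      | (constructor <;> push_cast <;> ring)
      | (constructor <;> ring)

lemma chunk7 (r : Nat) (hr : 1 ≤ r) :
    (PySem.List.pyRange (r:Int) 0 (-1)).map (fun i => [i * 37, (r:Int) * 44 - i * 22])
      = (List.range r).map (fun j => pt r (5 * r + j)) := by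
  rw [PySem.List.pyRange_neg_one, List.map_map, show ((r:Int) - 0).toNat = r by omega]
  refine List.map_congr_left (fun j hj => ?_)
  simp only [List.mem_range] at hj
  rw [pt_eq r 5 j hr hj]
  simp only [ptv, ptstep, Function.comp_apply, List.cons.injEq, and_true]
  norm_num
  first
      | (constructor <;> push_cast <;> ring)
      | (constructor <;> ring)

lemma chunk0 (r : Nat) (hr : 1 ≤ r) : ([0, (r:Int) * 44] : List Int) = pt r 0 := by
  rw [show pt r 0 = pt r (0 * r + 0) by norm_num, pt_eq r 0 0 hr hr]
  simp only [ptv, ptstep]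
  norm_num; ring

lemma chunk4 (r : Nat) (hr : 1 ≤ r) : ([0, -(r:Int) * 44] : List Int) = pt r (3 * r) := by
  rw [show pt r (3 * r) = pt r (3 * r + 0) by norm_num, pt_eq r 3 0 hr hr]
  simp only [ptv, ptstep]
  norm_num; ring

lemma preL_build (r : Nat) (hr : 1 ≤ r) :
    preL r = [pt r 0]
      ++ ((List.range r).map (fun j => pt r (1 + j))
      ++ ((List.range (r - 1)).map (fun j => pt r (1 + r + j))
      ++ ((List.range r).map (fun j => pt r (2 * r + j))
      ++ ([pt r (3 * r)]
      ++ ((List.range r).map (fun j => pt r (3 * r + 1 + j))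
      ++ ((List.range (r - 1)).map (fun j => pt r (4 * r + 1 + j))
      ++ (List.range r).map (fun j => pt r (5 * r + j)))))))) := by
  unfold preL
  rw [show 6 * r = 1 + (r + ((r - 1) + (r + (1 + (r + ((r - 1) + r)))))) by omega]
  simp only [List.range_add, List.map_append, List.map_map, List.range_one, List.map_cons,
    List.map_nil]
  refine congrArg₂ (· ++ ·) rfl (congrArg₂ (· ++ ·) ?_ (congrArg₂ (· ++ ·) ?_
    (congrArg₂ (· ++ ·) ?_ (congrArg₂ (· ++ ·) ?_ (congrArg₂ (· ++ ·) ?_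
    (congrArg₂ (· ++ ·) ?_ ?_))))))
  · exact List.map_congr_left fun j _ => rfl
  · exact List.map_congr_left fun j _ => congrArg (pt r) (by simp only [Function.comp_apply]; omega)
  · exact List.map_congr_left fun j _ => congrArg (pt r) (by simp only [Function.comp_apply]; omega)
  · exact congrArg (fun u => [pt r u]) (by omega)
  · exact List.map_congr_left fun j _ => congrArg (pt r) (by simp only [Function.comp_apply]; omega)
  · exact List.map_congr_left fun j _ => congrArg (pt r) (by simp only [Function.comp_apply]; omega)
  · exact List.map_congr_left fun j _ => congrArg (pt r) (by simp only [Function.comp_apply]; omega)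

lemma rotmap (r : Nat) (hr : 1 ≤ r) :
    (List.range (6 * r)).map (fun j => pt r ((j + 5 * r + 1) % (6 * r))) =
      (preL r).drop (5 * r + 1) ++ (preL r).take (5 * r + 1) := by
  have h2 : preL r = (List.range (5 * r + 1)).map (pt r)
      ++ ((List.range (r - 1)).map (fun x => (5 * r + 1) + x)).map (pt r) := by
    unfold preL
    rw [show 6 * r = (5 * r + 1) + (r - 1) by omega, List.range_add, List.map_append]
  rw [h2, List.drop_left' (by simp), List.take_left' (by simp)]
  have hsplit : List.range (6 * r) = List.range (r - 1)
      ++ (List.range (5 * r + 1)).map (fun x => (r - 1) + x) := by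
    rw [← List.range_add]; congr 1; omega
  rw [hsplit, List.map_append, List.map_map, List.map_map]
  congr 1
  · refine List.map_congr_left (fun j hj => ?_)
    simp only [List.mem_range] at hj
    simp only [Function.comp_apply]
    exact congrArg (pt r) (by rw [Nat.mod_eq_of_lt (by omega)]; omega)
  · refine List.map_congr_left (fun j hj => ?_)
    simp only [List.mem_range] at hj
    simp only [Function.comp_apply]
    refine congrArg (pt r) ?_
    rw [show r - 1 + j + 5 * r + 1 = 6 * r + j by omega, Nat.add_mod_left,
      Nat.mod_eq_of_lt (by omega)]

-- A builds exactly the perimeter list, then rotates it r-1 times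
lemma A_eq (r : Nat) (hr : 1 ≤ r) :
    generate_hexagon_coordinates (r : Int) = rot1^[r - 1] (preL r) := by
  rcases Nat.eq_or_lt_of_le hr with h1 | h2
  · rw [← h1]; decide
  · have hfun : (fun (l : List (List Int)) (_ : Int) =>
        match PySem.List.pop? l (-1) with
        | some (x, rest) => PySem.List.insert rest 0 x
        | none => l) = (fun acc (_ : Int) => rot1 acc) := by
      funext l x
      unfold rot1
      rcases PySem.List.pop? l (-1) with _ | ⟨a, rest⟩ <;> rfl
    simp only [generate_hexagon_coordinates]
    rw [hfun, foldl_const_iterate, PySem.List.length_pyRange_one,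
      show ((r : Int) - 1 - 0).toNat = r - 1 by omega]
    refine congrArg _ ?_
    simp only [PySem.List.foldl_append_singleton_eq_map]
    rw [if_pos (show (1:Int) < (r:Int) by omega), if_pos (show (1:Int) < (r:Int) by omega),
      leftover_pos r (by omega), leftover_neg r (by omega),
      preL_build r hr, ← chunk0 r hr, ← chunk1 r hr, ← chunk2 r hr, ← chunk3 r hr,
      ← chunk4 r hr, ← chunk5 r hr, ← chunk6 r hr, ← chunk7 r hr]
    simp [List.append_assoc]

-- B emits the rotated perimeter directly
lemma alt_eq (r : Nat) (hr : 1 ≤ r) :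
    generate_hexagon_coordinates_alt (r : Int) =
      (preL r).drop (5 * r + 1) ++ (preL r).take (5 * r + 1) := by
  simp only [generate_hexagon_coordinates_alt]
  rw [PySem.List.pyRange_one, List.map_map,
    show (6 * (r : Int) - 0).toNat = 6 * r by omega]
  refine Eq.trans (List.map_congr_left (fun j hj => ?_)) (rotmap r hr)
  simp only [List.mem_range] at hj
  simp only [Function.comp_apply]
  have hmod : PySem.Int.mod (0 + (j : Int) + 5 * (r : Int) + 1) (6 * (r : Int))
      = ((j + 5 * r + 1) % (6 * r) : Nat) := by
    unfold PySem.Int.mod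
    rw [show (0 + (j : Int) + 5 * (r : Int) + 1) = ((j + 5 * r + 1 : Nat) : Int) by
        push_cast; ring,
      show (6 * (r : Int)) = ((6 * r : Nat) : Int) by push_cast; ring,
      Int.fmod_eq_emod]
    simp [Int.natCast_mod]
  rw [hmod]
  have hult : (j + 5 * r + 1) % (6 * r) < 6 * r := Nat.mod_lt _ (by omega)
  generalize hG : (j + 5 * r + 1) % (6 * r) = u at hult ⊢
  have hdiv : PySem.Int.floordiv (u : Int) (r : Int) = ((u / r : Nat) : Int) := by
    unfold PySem.Int.floordiv; rw [Int.fdiv_eq_ediv]; simp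
  have hmod2 : PySem.Int.mod (u : Int) (r : Int) = ((u % r : Nat) : Int) := by
    unfold PySem.Int.mod; rw [Int.fmod_eq_emod]; simp
  rw [hdiv, hmod2]
  have he : u / r < 6 := (Nat.div_lt_iff_lt_mul (by omega)).2 (by omega)
  unfold pt
  generalize hE : u / r = e at he ⊢
  have hcases : e = 0 ∨ e = 1 ∨ e = 2 ∨ e = 3 ∨ e = 4 ∨ e = 5 := by omega
  rcases hcases with h | h | h | h | h | h <;> subst h <;>
    simp [PySem.List.pyGet?, PySem.List.pyIdx?, ptv, ptstep]

-- ===== VERDICT (by name: the statement is the Claim_ definition above) =====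
theorem generate_hexagon_coordinates_spec : Claim_unchanged_generate_hexagon_coordinates := by
  intro ring _ hpre hd
  obtain ⟨r, rfl⟩ := Int.eq_ofNat_of_zero_le hpre
  have hr : 1 ≤ r := by
    rcases Nat.eq_zero_or_pos r with h | h
    · exact absurd (by simp [h, D_generate_hexagon_coordinates]) hd
    · exact h
  rw [A_eq r hr, alt_eq r hr, rot1_iterate _ _ (by rw [length_preL]; omega), length_preL]
  congr 1 <;> congr 1 <;> omega

theorem generate_hexagon_coordinates_changed : Claim_changed_generate_hexagon_coordinates := by
  unfold Claim_changed_generate_hexagon_coordinates; decide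

theorem generate_hexagon_coordinates_tight : Claim_exact_generate_hexagon_coordinates := by
  intro ring _ _ hd
  subst hd
  decide
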